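-- pv_equiv track=rewrite | github.com/thattanmay/factorio | automation/intermittent.py | get_recipe
-- ===== SOURCE A (Python) =====
-- def get_recipe(items, recipe_data):
--     for item in items:
--         if item not in recipe_data:
--             return
--         for ingredient in recipe_data[item]:
--             yield ingredient, item
--             yield from get_recipe(
--                 [
--                     ingredient,
--                 ],
--                 recipe_data,
--             )
-- ===== SOURCE B (Python) =====
-- def get_recipe(items, recipe_data):
--     # Memoized DAG replay: each key's pair list is computed once and replayed
--     # on later occurrences instead of re-expanding the subtree recursively.
--     memo = {}
--
--     def expand(x):
--         got = memo.get(x)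
--         if got is not None:
--             return got
--         pairs = []
--         for ing in recipe_data[x]:
--             pairs.append((ing, x))
--             if ing in recipe_data:
--                 pairs.extend(expand(ing))
--         memo[x] = pairs
--         return pairs
--
--     for item in items:
--         if item not in recipe_data:
--             return
--         yield from expand(item)
-- ===== Notes on version B (the rewrite author's own statement) =====
-- stated objective: alternative
-- what changed: B memoizes the fully-expanded pair list of every recipe key in a dict and replays it on later occurrences, instead of A's re-expanding the whole dependency subtree through a fresh recursive generator for every ingredient occurrence.
import Mathlib
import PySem

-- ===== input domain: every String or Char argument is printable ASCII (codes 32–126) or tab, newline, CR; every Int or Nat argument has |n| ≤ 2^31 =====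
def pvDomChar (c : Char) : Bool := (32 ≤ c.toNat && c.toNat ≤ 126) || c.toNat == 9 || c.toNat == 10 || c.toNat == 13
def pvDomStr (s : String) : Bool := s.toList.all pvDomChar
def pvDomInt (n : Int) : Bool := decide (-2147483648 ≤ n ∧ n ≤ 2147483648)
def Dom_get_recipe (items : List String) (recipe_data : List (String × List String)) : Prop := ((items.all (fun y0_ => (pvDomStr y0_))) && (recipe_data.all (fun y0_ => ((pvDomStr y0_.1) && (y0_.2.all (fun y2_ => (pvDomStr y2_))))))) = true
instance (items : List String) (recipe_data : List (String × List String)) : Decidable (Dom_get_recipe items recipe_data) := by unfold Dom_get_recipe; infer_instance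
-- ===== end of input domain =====

-- B memoizes each recipe key's fully-expanded pair list in a dict and replays it,
-- instead of A's fresh recursive re-expansion of the subtree at every occurrence
-- (objective: alternative algorithm, same value).


-- ===== PORT A =====
-- Python-dict lookup on the association list: a Python dict built from pairs keeps
-- the LAST binding of a key, so lookup is the first match in the reversed list (exact).
def pvLook (rd : List (String × List String)) (x : String) : Option (List String) :=
  (rd.reverse.find? (fun p => p.1 == x)).map (fun p => p.2)

def pvIsKey (rd : List (String × List String)) (x : String) : Bool :=
  (pvLook rd x).isSome

-- A's recursion is unbounded (it diverges on inputs excluded by Pre_ below);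
-- the port carries a fuel argument that Pre_ guarantees is never exhausted.
def getA (rd : List (String × List String)) (fuel : Nat) (items : List String) :
    List (String × String) :=
  match items with
  | [] => []
  | item :: rest =>
    match pvLook rd item with
    | none => []
    | some ings =>
      (ings.flatMap (fun ing =>
        (ing, item) :: (match fuel with
          | 0 => []          -- fuel exhaustion: unreachable under Pre_
          | n + 1 => getA rd n [ing]))) ++ getA rd fuel rest
termination_by (fuel, items.length)
decreasing_by
  · exact Prod.Lex.left _ _ (Nat.lt_succ_self _)
  · exact Prod.Lex.right _ (by simp)

def get_recipe (items : List String) (recipe_data : List (String × List String)) :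
    List (String × String) :=
  getA recipe_data recipe_data.length items

-- ===== PORT B =====
-- expand x memo: x's full pair list, computed once and cached in memo (fuel as above).
def expandB (rd : List (String × List String)) (fuel : Nat) (x : String)
    (memo : PySem.Dict String (List (String × String))) :
    List (String × String) × PySem.Dict String (List (String × String)) :=
  match memo.get? x with
  | some ps => (ps, memo)
  | none =>
    let ings := (pvLook rd x).getD []
    let r := ings.foldl (fun acc ing =>
        let acc1 := (acc.1 ++ [(ing, x)], acc.2)
        if pvIsKey rd ing then
          match fuel with
          | 0 => acc1        -- fuel exhaustion: unreachable under Pre_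
          | n + 1 =>
            let e := expandB rd n ing acc1.2
            (acc1.1 ++ e.1, e.2)
        else acc1) ([], memo)
    (r.1, r.2.insert x r.1)
termination_by fuel
decreasing_by exact Nat.lt_succ_self _

def goB (rd : List (String × List String)) (fuel : Nat) (items : List String)
    (memo : PySem.Dict String (List (String × String))) : List (String × String) :=
  match items with
  | [] => []
  | item :: rest =>
    if pvIsKey rd item then
      let e := expandB rd fuel item memo
      e.1 ++ goB rd fuel rest e.2
    else []

def get_recipe_alt (items : List String) (recipe_data : List (String × List String)) :
    List (String × String) :=
  goB recipe_data recipe_data.length items PySem.Dict.empty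

-- ===== PRECONDITION & SPEC =====
def pvSuccs (rd : List (String × List String)) (x : String) : List String :=
  (pvLook rd x).getD []

def pvStep (rd : List (String × List String)) (S : Finset String) : Finset String :=
  S ∪ S.biUnion (fun y => (pvSuccs rd y).toFinset)

-- everything the key x's recipe (transitively) depends on
def pvReach (rd : List (String × List String)) (x : String) : Finset String :=
  (pvStep rd)^[(rd.flatMap (fun p => p.2)).length + 1] (pvSuccs rd x).toFinset

-- everything A actually expands: the items up to the first non-key, and their dependencies
def pvRF (rd : List (String × List String)) (items : List String) : Finset String :=
  (pvStep rd)^[(rd.flatMap (fun p => p.2)).length + items.length + 1]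
    (items.takeWhile (fun it => pvIsKey rd it)).toFinset

-- Pre_ excludes exactly the inputs on which A does not return: a cyclic dependency
-- among the keys A expands makes A's recursion infinite (Python RecursionError).
def Pre_get_recipe (items : List String) (recipe_data : List (String × List String)) : Prop :=
  ∀ k ∈ pvRF recipe_data items, k ∉ pvReach recipe_data k

instance (items : List String) (recipe_data : List (String × List String)) :
    Decidable (Pre_get_recipe items recipe_data) := by unfold Pre_get_recipe; infer_instance

def pvWitness_get_recipe : List String × (List (String × List String)) :=
  (["a"], [("a", ["b", "c"]), ("b", ["c"])])

def Spec_get_recipe (items : List String) (recipe_data : List (String × List String)) (out : List (String × String)) : Prop := out = get_recipe_alt items recipe_data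
instance (items : List String) (recipe_data : List (String × List String)) (out : List (String × String)) : Decidable (Spec_get_recipe items recipe_data out) := by unfold Spec_get_recipe; infer_instance

-- ===== CLAIM (what is proved, stated in full; the proofs are below) =====
def Claim_equal_get_recipe : Prop := ∀ (items : List String) (recipe_data : List (String × List String)), Dom_get_recipe items recipe_data → Pre_get_recipe items recipe_data → Spec_get_recipe items recipe_data (get_recipe items recipe_data)

-- ===== LEMMAS AND PROOFS =====

-- chain bound: BndB d x ↔ every chain of key-expansions from x has depth ≤ d
def BndB (rd : List (String × List String)) : Nat → String → Prop
  | 0, x => pvIsKey rd x = false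
  | d + 1, x => ∀ ing ∈ pvSuccs rd x, BndB rd d ing

theorem succs_eq_nil_of_not_key (rd : List (String × List String)) (x : String)
    (h : pvIsKey rd x = false) : pvSuccs rd x = [] := by
  unfold pvIsKey at h
  unfold pvSuccs
  cases hl : pvLook rd x with
  | none => rfl
  | some v => rw [hl] at h; simp at h

theorem look_eq_none_of_not_key (rd : List (String × List String)) (x : String)
    (h : pvIsKey rd x = false) : pvLook rd x = none := by
  unfold pvIsKey at h
  cases hl : pvLook rd x with
  | none => rfl
  | some v => rw [hl] at h; simp at h

theorem look_eq_some_of_key (rd : List (String × List String)) (x : String)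
    (h : pvIsKey rd x = true) : ∃ v, pvLook rd x = some v := by
  unfold pvIsKey at h
  cases hl : pvLook rd x with
  | none => rw [hl] at h; simp at h
  | some v => exact ⟨v, rfl⟩

theorem bnd_mono (rd : List (String × List String)) :
    ∀ d x, BndB rd d x → BndB rd (d + 1) x := by
  intro d
  induction d with
  | zero =>
    intro x h ing hing
    rw [succs_eq_nil_of_not_key rd x h] at hing
    simp at hing
  | succ d ih =>
    intro x h ing hing
    exact ih ing (h ing hing)

theorem getA_nil (rd : List (String × List String)) (fuel : Nat) :
    getA rd fuel [] = [] := by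
  rw [getA]

theorem getA_nonkey (rd : List (String × List String)) (fuel : Nat) (x : String)
    (h : pvLook rd x = none) : getA rd fuel [x] = [] := by
  rw [getA, h]

theorem getA_key (rd : List (String × List String)) (fuel : Nat) (x : String)
    (ings : List String) (h : pvLook rd x = some ings) :
    getA rd (fuel + 1) [x] =
      ings.flatMap (fun ing => (ing, x) :: getA rd fuel [ing]) := by
  rw [getA, h, getA_nil]
  simp only [List.append_nil]

-- fuel stability: with fuel at least the chain bound the result no longer depends on fuel
theorem getA_stable (rd : List (String × List String)) :
    ∀ d x, BndB rd d x → ∀ n, d ≤ n → getA rd n [x] = getA rd d [x] := by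
  intro d
  induction d with
  | zero =>
    intro x h n _
    have h2 : pvIsKey rd x = false := h
    have hl := look_eq_none_of_not_key rd x h2
    rw [getA_nonkey rd n x hl, getA_nonkey rd 0 x hl]
  | succ d ih =>
    intro x h n hn
    obtain ⟨m, rfl⟩ : ∃ m, n = m + 1 := ⟨n - 1, by omega⟩
    cases hl : pvLook rd x with
    | none => rw [getA_nonkey rd _ x hl, getA_nonkey rd _ x hl]
    | some ings =>
      rw [getA_key rd m x ings hl, getA_key rd d x ings hl]
      apply List.flatMap_congr
      intro ing hing
      have hb : BndB rd d ing := h ing (by simpa [pvSuccs, hl] using hing)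
      rw [ih ing hb m (by omega)]

theorem getA_stable2 (rd : List (String × List String)) {d : Nat} {x : String}
    (h : BndB rd d x) {n m : Nat} (hn : d ≤ n) (hm : d ≤ m) :
    getA rd n [x] = getA rd m [x] := by
  rw [getA_stable rd d x h n hn, getA_stable rd d x h m hm]

-- ---- reachability machinery (iterated successor closure on Finsets) ----

theorem subset_step (rd : List (String × List String)) (S : Finset String) :
    S ⊆ pvStep rd S := Finset.subset_union_left

theorem subset_iterate (rd : List (String × List String)) (S : Finset String) (n : Nat) :
    S ⊆ (pvStep rd)^[n] S := by
  induction n with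
  | zero => simp
  | succ n ih =>
    rw [Function.iterate_succ_apply']
    exact ih.trans (subset_step rd _)

theorem step_subset_U (rd : List (String × List String)) {U S : Finset String}
    (hU : ∀ y, (pvSuccs rd y).toFinset ⊆ U) (h : S ⊆ U) : pvStep rd S ⊆ U := by
  unfold pvStep
  apply Finset.union_subset h
  intro y hy
  rw [Finset.mem_biUnion] at hy
  obtain ⟨z, _, hz⟩ := hy
  exact hU z hz

theorem iterate_subset_U (rd : List (String × List String)) {U S : Finset String}
    (hU : ∀ y, (pvSuccs rd y).toFinset ⊆ U) (h : S ⊆ U) (n : Nat) :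
    (pvStep rd)^[n] S ⊆ U := by
  induction n with
  | zero => simpa
  | succ n ih =>
    rw [Function.iterate_succ_apply']
    exact step_subset_U rd hU ih

theorem iterate_stable (rd : List (String × List String)) (S : Finset String) {i : Nat}
    (h : (pvStep rd)^[i + 1] S = (pvStep rd)^[i] S) :
    ∀ j, i ≤ j → (pvStep rd)^[j] S = (pvStep rd)^[i] S := by
  intro j hj
  induction hj with
  | refl => rfl
  | step _ ih =>
    rw [Function.iterate_succ_apply', ih,
      show pvStep rd ((pvStep rd)^[i] S) = (pvStep rd)^[i + 1] S from
        (Function.iterate_succ_apply' _ _ _).symm, h]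

theorem card_iterate_grow (rd : List (String × List String)) (S : Finset String) (i : Nat)
    (h : ∀ j < i, (pvStep rd)^[j + 1] S ≠ (pvStep rd)^[j] S) :
    S.card + i ≤ ((pvStep rd)^[i] S).card := by
  induction i with
  | zero => simp
  | succ i ih =>
    have hgrow : ((pvStep rd)^[i] S).card < ((pvStep rd)^[i + 1] S).card := by
      apply Finset.card_lt_card
      rw [Function.iterate_succ_apply']
      constructor
      · exact subset_step rd _
      · intro hsub
        exact h i (Nat.lt_succ_self _)
          (by rw [Function.iterate_succ_apply']
              exact le_antisymm hsub (subset_step rd _))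
    have := ih (fun j hj => h j (Nat.lt_succ_of_lt hj))
    omega

theorem fix_exists (rd : List (String × List String)) {U S : Finset String}
    (hU : ∀ y, (pvSuccs rd y).toFinset ⊆ U) (hS : S ⊆ U) :
    ∃ i ≤ U.card, (pvStep rd)^[i + 1] S = (pvStep rd)^[i] S := by
  by_contra hc
  push_neg at hc
  have h : ∀ j < U.card + 1, (pvStep rd)^[j + 1] S ≠ (pvStep rd)^[j] S := by
    intro j hj
    exact hc j (by omega)
  have h1 := card_iterate_grow rd S (U.card + 1) h
  have h2 : ((pvStep rd)^[U.card + 1] S).card ≤ U.card :=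
    Finset.card_le_card (iterate_subset_U rd hU hS _)
  omega

-- the saturated iterate is closed under taking successors
theorem iterate_closed (rd : List (String × List String)) {U S : Finset String}
    (hU : ∀ y, (pvSuccs rd y).toFinset ⊆ U) (hS : S ⊆ U) {N : Nat} (hN : U.card < N)
    {y z : String} (hy : y ∈ (pvStep rd)^[N] S) (hz : z ∈ pvSuccs rd y) :
    z ∈ (pvStep rd)^[N] S := by
  obtain ⟨i, hi, hfix⟩ := fix_exists rd hU hS
  have hstabN := iterate_stable rd _ hfix N (by omega)
  have hstabN1 := iterate_stable rd _ hfix (N + 1) (by omega)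
  have : z ∈ (pvStep rd)^[N + 1] S := by
    rw [Function.iterate_succ_apply']
    unfold pvStep
    apply Finset.mem_union_right
    rw [Finset.mem_biUnion]
    exact ⟨y, hy, List.mem_toFinset.mpr hz⟩
  rw [hstabN1] at this
  rw [hstabN]
  exact this

def pvIng (rd : List (String × List String)) : Finset String :=
  (rd.flatMap (fun p => p.2)).toFinset

theorem succs_subset_ing (rd : List (String × List String)) (x : String) :
    (pvSuccs rd x).toFinset ⊆ pvIng rd := by
  intro y hy
  rw [List.mem_toFinset] at hy
  unfold pvSuccs at hy
  cases hl : pvLook rd x with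
  | none => rw [hl] at hy; simp at hy
  | some v =>
    rw [hl] at hy
    simp only [Option.getD_some] at hy
    unfold pvLook at hl
    cases hf : rd.reverse.find? (fun p => p.1 == x) with
    | none => rw [hf] at hl; simp at hl
    | some p =>
      rw [hf] at hl
      simp only [Option.map_some] at hl
      have hmem : p ∈ rd.reverse := List.mem_of_find?_eq_some hf
      rw [List.mem_reverse] at hmem
      unfold pvIng
      rw [List.mem_toFinset, List.mem_flatMap]
      exact ⟨p, hmem, by rw [Option.some_inj] at hl; rw [hl]; exact hy⟩

theorem reach_trans (rd : List (String × List String)) {x y z : String}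
    (hy : y ∈ pvReach rd x) (hz : z ∈ pvSuccs rd y) : z ∈ pvReach rd x := by
  have hcard : (pvIng rd).card ≤ (rd.flatMap (fun p => p.2)).length :=
    List.toFinset_card_le _
  exact iterate_closed rd (succs_subset_ing rd) (succs_subset_ing rd x)
    (by omega) hy hz

theorem mem_succs_mem_reach (rd : List (String × List String)) {x y : String}
    (h : y ∈ pvSuccs rd x) : y ∈ pvReach rd x := by
  unfold pvReach
  exact subset_iterate rd _ _ (List.mem_toFinset.mpr h)

theorem rf_closed (rd : List (String × List String)) (items : List String) {y z : String}
    (hy : y ∈ pvRF rd items) (hz : z ∈ pvSuccs rd y) : z ∈ pvRF rd items := by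
  have hU : ∀ w, (pvSuccs rd w).toFinset ⊆
      pvIng rd ∪ (items.takeWhile (fun it => pvIsKey rd it)).toFinset :=
    fun w => (succs_subset_ing rd w).trans Finset.subset_union_left
  have hcard1 : (pvIng rd).card ≤ (rd.flatMap (fun p => p.2)).length :=
    List.toFinset_card_le _
  have hcard2 : ((items.takeWhile (fun it => pvIsKey rd it)).toFinset).card ≤ items.length :=
    (List.toFinset_card_le _).trans (List.takeWhile_sublist _).length_le
  have hcard3 := Finset.card_union_le (pvIng rd)
    ((items.takeWhile (fun it => pvIsKey rd it)).toFinset)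
  exact iterate_closed rd hU Finset.subset_union_right (by omega) hy hz

theorem start_subset_rf (rd : List (String × List String)) (items : List String) :
    ∀ it ∈ items.takeWhile (fun it => pvIsKey rd it), it ∈ pvRF rd items := by
  intro it hit
  exact subset_iterate rd _ _ (List.mem_toFinset.mpr hit)

-- ---- from acyclicity of the expanded region to the chain bound ----

def pvKeysF (rd : List (String × List String)) : Finset String :=
  (rd.map Prod.fst).toFinset

def pvAnc (rd : List (String × List String)) (x : String) : Finset String :=
  (pvKeysF rd).filter (fun k => x ∈ pvReach rd k)

theorem key_mem_keysF (rd : List (String × List String)) {x : String}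
    (h : pvIsKey rd x = true) : x ∈ pvKeysF rd := by
  unfold pvIsKey at h
  cases hl : pvLook rd x with
  | none => rw [hl] at h; simp at h
  | some v =>
    unfold pvLook at hl
    cases hf : rd.reverse.find? (fun p => p.1 == x) with
    | none => rw [hf] at hl; simp at hl
    | some p =>
      have hmem : p ∈ rd.reverse := List.mem_of_find?_eq_some hf
      have heq : p.1 = x := by
        have := List.find?_some hf
        simpa using this
      rw [List.mem_reverse] at hmem
      unfold pvKeysF
      rw [List.mem_toFinset, List.mem_map]
      exact ⟨p, hmem, heq⟩

theorem anc_lt_of_edge (rd : List (String × List String)) (items : List String)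
    (hA : ∀ k ∈ pvRF rd items, k ∉ pvReach rd k) {x y : String}
    (hxRF : x ∈ pvRF rd items)
    (hx : pvIsKey rd x = true) (hy : y ∈ pvSuccs rd x) :
    (pvAnc rd x).card < (pvAnc rd y).card := by
  apply Finset.card_lt_card
  constructor
  · intro k hk
    unfold pvAnc at hk ⊢
    rw [Finset.mem_filter] at hk ⊢
    exact ⟨hk.1, reach_trans rd hk.2 hy⟩
  · intro hsub
    have hxmem : x ∈ pvAnc rd y := by
      unfold pvAnc
      rw [Finset.mem_filter]
      exact ⟨key_mem_keysF rd hx, mem_succs_mem_reach rd hy⟩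
    have hxx : x ∈ pvAnc rd x := hsub hxmem
    unfold pvAnc at hxx
    rw [Finset.mem_filter] at hxx
    exact hA x hxRF hxx.2

theorem anc_card_lt_len (rd : List (String × List String)) (items : List String)
    (hA : ∀ k ∈ pvRF rd items, k ∉ pvReach rd k) {x : String}
    (hxRF : x ∈ pvRF rd items)
    (hx : pvIsKey rd x = true) : (pvAnc rd x).card < rd.length := by
  have h1 : pvAnc rd x ⊆ (pvKeysF rd).erase x := by
    intro k hk
    rw [Finset.mem_erase]
    unfold pvAnc at hk
    rw [Finset.mem_filter] at hk
    refine ⟨?_, hk.1⟩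
    intro heq
    rw [heq] at hk
    exact hA x hxRF hk.2
  have h2 : ((pvKeysF rd).erase x).card < (pvKeysF rd).card :=
    Finset.card_erase_lt_of_mem (key_mem_keysF rd hx)
  have h3 : (pvKeysF rd).card ≤ rd.length := by
    unfold pvKeysF
    calc (rd.map Prod.fst).toFinset.card ≤ (rd.map Prod.fst).length :=
          List.toFinset_card_le _
      _ = rd.length := List.length_map _
  have := Finset.card_le_card h1
  omega

theorem bnd_of_acyc (rd : List (String × List String)) (items : List String)
    (hA : ∀ k ∈ pvRF rd items, k ∉ pvReach rd k) :
    ∀ n x, x ∈ pvRF rd items → rd.length ≤ (pvAnc rd x).card + n → BndB rd n x := by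
  intro n
  induction n with
  | zero =>
    intro x hxRF h
    show pvIsKey rd x = false
    by_contra hk
    rw [Bool.not_eq_false] at hk
    have := anc_card_lt_len rd items hA hxRF hk
    omega
  | succ n ih =>
    intro x hxRF h ing hing
    have hx : pvIsKey rd x = true := by
      by_contra hk
      rw [Bool.not_eq_true] at hk
      rw [succs_eq_nil_of_not_key rd x hk] at hing
      simp at hing
    have hlt := anc_lt_of_edge rd items hA hxRF hx hing
    exact ih ing (rf_closed rd items hxRF hing) (by omega)

theorem bnd_all (rd : List (String × List String)) (items : List String)
    (hA : ∀ k ∈ pvRF rd items, k ∉ pvReach rd k) {x : String}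
    (hxRF : x ∈ pvRF rd items) : BndB rd rd.length x :=
  bnd_of_acyc rd items hA rd.length x hxRF (by omega)

theorem bnd_succ (rd : List (String × List String)) (items : List String)
    (hA : ∀ k ∈ pvRF rd items, k ∉ pvReach rd k) {x ing : String}
    (hxRF : x ∈ pvRF rd items)
    (hx : pvIsKey rd x = true) (hing : ing ∈ pvSuccs rd x) :
    BndB rd (rd.length - 1) ing := by
  have h1 : 1 ≤ (pvAnc rd ing).card := by
    apply Finset.card_pos.mpr
    exact ⟨x, by
      unfold pvAnc
      rw [Finset.mem_filter]
      exact ⟨key_mem_keysF rd hx, mem_succs_mem_reach rd hing⟩⟩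
  exact bnd_of_acyc rd items hA (rd.length - 1) ing
    (rf_closed rd items hxRF hing) (by omega)

-- ---- the canonical value and its fixed-point equation ----

theorem cfix_nonkey (rd : List (String × List String)) {x : String}
    (h : pvIsKey rd x = false) (fuel : Nat) : getA rd fuel [x] = [] :=
  getA_nonkey rd fuel x (look_eq_none_of_not_key rd x h)

theorem len_pos_of_key (rd : List (String × List String)) {x : String}
    (h : pvIsKey rd x = true) : 1 ≤ rd.length := by
  cases rd with
  | nil => unfold pvIsKey pvLook at h; simp at h
  | cons a l => simp

theorem cfix_key (rd : List (String × List String)) (items : List String)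
    (hA : ∀ k ∈ pvRF rd items, k ∉ pvReach rd k) {x : String}
    (hxRF : x ∈ pvRF rd items) (hx : pvIsKey rd x = true) :
    getA rd rd.length [x] =
      (pvSuccs rd x).flatMap (fun ing => (ing, x) :: getA rd rd.length [ing]) := by
  obtain ⟨ings, hl⟩ := look_eq_some_of_key rd x hx
  have hK : 1 ≤ rd.length := len_pos_of_key rd hx
  obtain ⟨m, hm⟩ : ∃ m, rd.length = m + 1 := ⟨rd.length - 1, by omega⟩
  rw [hm, getA_key rd m x ings hl]
  have hsucc : pvSuccs rd x = ings := by unfold pvSuccs; rw [hl]; rfl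
  rw [hsucc]
  apply List.flatMap_congr
  intro ing hing
  have hb : BndB rd (rd.length - 1) ing :=
    bnd_succ rd items hA hxRF hx (by rw [hsucc]; exact hing)
  have := getA_stable2 rd hb (n := m) (m := m + 1) (by omega) (by omega)
  rw [this]

-- ---- B-side: the memo invariant ----

def MemoOK (rd : List (String × List String))
    (memo : PySem.Dict String (List (String × String))) : Prop :=
  ∀ k v, memo.get? k = some v → v = getA rd rd.length [k]

theorem memoOK_empty (rd : List (String × List String)) :
    MemoOK rd PySem.Dict.empty := by
  intro k v h
  rw [PySem.Dict.get?_empty] at h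
  exact absurd h (by simp)

theorem memoOK_insert (rd : List (String × List String))
    {memo : PySem.Dict String (List (String × String))} (h : MemoOK rd memo)
    {x : String} {v : List (String × String)} (hv : v = getA rd rd.length [x]) :
    MemoOK rd (memo.insert x v) := by
  intro k w hw
  rw [PySem.Dict.get?_insert] at hw
  split at hw
  · rename_i heq
    rw [Option.some_inj] at hw
    rw [← hw, hv, heq]
  · exact h k w hw

-- the inner fold of expandB, processed prefix by prefix
theorem expandB_fold (rd : List (String × List String)) (items : List String)
    (hA : ∀ k ∈ pvRF rd items, k ∉ pvReach rd k) (fuel : Nat)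
    (ih : ∀ y memo, y ∈ pvRF rd items → pvIsKey rd y = true → BndB rd fuel y →
      MemoOK rd memo → ∀ n, fuel = n + 1 →
      (expandB rd n y memo).1 = getA rd rd.length [y] ∧ MemoOK rd (expandB rd n y memo).2)
    (x : String) :
    ∀ (l : List String) (acc0 : List (String × String))
      (m0 : PySem.Dict String (List (String × String))),
      (∀ ing ∈ l, BndB rd fuel ing) → (∀ ing ∈ l, ing ∈ pvRF rd items) → MemoOK rd m0 →
      (l.foldl (fun acc ing =>
        let acc1 := (acc.1 ++ [(ing, x)], acc.2)
        if pvIsKey rd ing then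
          match fuel with
          | 0 => acc1
          | n + 1 =>
            let e := expandB rd n ing acc1.2
            (acc1.1 ++ e.1, e.2)
        else acc1) (acc0, m0)).1
        = acc0 ++ l.flatMap (fun ing => (ing, x) :: getA rd rd.length [ing]) ∧
      MemoOK rd ((l.foldl (fun acc ing =>
        let acc1 := (acc.1 ++ [(ing, x)], acc.2)
        if pvIsKey rd ing then
          match fuel with
          | 0 => acc1
          | n + 1 =>
            let e := expandB rd n ing acc1.2
            (acc1.1 ++ e.1, e.2)
        else acc1) (acc0, m0)).2) := by
  intro l
  induction l with
  | nil => intro acc0 m0 _ _ hm0; simp [hm0]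
  | cons ing rest ihl =>
    intro acc0 m0 hbnd hrf hm0
    simp only [List.foldl_cons]
    by_cases hk : pvIsKey rd ing = true
    · rw [if_pos hk]
      cases fuel with
      | zero =>
        have := hbnd ing (List.mem_cons_self)
        rw [show BndB rd 0 ing = (pvIsKey rd ing = false) from rfl] at this
        rw [hk] at this
        exact absurd this (by simp)
      | succ n =>
        have hbi : BndB rd (n + 1) ing := hbnd ing List.mem_cons_self
        obtain ⟨he1, he2⟩ :=
          ih ing m0 (hrf ing List.mem_cons_self) hk hbi hm0 n rfl
        have := ihl (acc0 ++ [(ing, x)] ++ (expandB rd n ing m0).1)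
          (expandB rd n ing m0).2 (fun y hy => hbnd y (List.mem_cons_of_mem _ hy))
          (fun y hy => hrf y (List.mem_cons_of_mem _ hy)) he2
        simp only at this ⊢
        rw [he1] at this
        rw [he1]
        refine ⟨?_, this.2⟩
        rw [this.1]
        simp
    · rw [if_neg hk]
      rw [Bool.not_eq_true] at hk
      have := ihl (acc0 ++ [(ing, x)]) m0
        (fun y hy => hbnd y (List.mem_cons_of_mem _ hy))
        (fun y hy => hrf y (List.mem_cons_of_mem _ hy)) hm0
      simp only at this ⊢
      refine ⟨?_, this.2⟩
      rw [this.1]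
      simp [List.flatMap_cons, cfix_nonkey rd hk]

theorem expandB_correct (rd : List (String × List String)) (items : List String)
    (hA : ∀ k ∈ pvRF rd items, k ∉ pvReach rd k) :
    ∀ (fuel : Nat) (x : String) (memo : PySem.Dict String (List (String × String))),
      x ∈ pvRF rd items → pvIsKey rd x = true → BndB rd (fuel + 1) x → MemoOK rd memo →
      (expandB rd fuel x memo).1 = getA rd rd.length [x] ∧
      MemoOK rd (expandB rd fuel x memo).2 := by
  intro fuel
  induction fuel with
  | zero =>
    intro x memo hxRF hx hb hm
    rw [expandB]
    cases hg : memo.get? x with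
    | some ps => exact ⟨hm x ps hg, hm⟩
    | none =>
      simp only
      have hfold := expandB_fold rd items hA 0
        (fun y memo hyRF hy hb0 _ n hn => by cases hn) x
        ((pvLook rd x).getD []) [] memo
        (by intro ing hing; exact hb ing hing)
        (by intro ing hing; exact rf_closed rd items hxRF hing) hm
      simp only at hfold
      constructor
      · rw [hfold.1, cfix_key rd items hA hxRF hx]
        simp [pvSuccs]
      · apply memoOK_insert rd hfold.2
        rw [hfold.1, cfix_key rd items hA hxRF hx]
        simp [pvSuccs]
  | succ n ihn =>
    intro x memo hxRF hx hb hm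
    rw [expandB]
    cases hg : memo.get? x with
    | some ps => exact ⟨hm x ps hg, hm⟩
    | none =>
      simp only
      have hfold := expandB_fold rd items hA (n + 1)
        (fun y memo hyRF hy hby hmy m hm' => by
          cases hm'
          exact ihn y memo hyRF hy hby hmy) x
        ((pvLook rd x).getD []) [] memo
        (by intro ing hing; exact hb ing hing)
        (by intro ing hing; exact rf_closed rd items hxRF hing) hm
      simp only at hfold
      constructor
      · rw [hfold.1, cfix_key rd items hA hxRF hx]
        simp [pvSuccs]
      · apply memoOK_insert rd hfold.2
        rw [hfold.1, cfix_key rd items hA hxRF hx]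
        simp [pvSuccs]

theorem getA_cons_split (rd : List (String × List String)) (fuel : Nat)
    (item : String) (rest : List String) (hk : pvIsKey rd item = true) :
    getA rd fuel (item :: rest) = getA rd fuel [item] ++ getA rd fuel rest := by
  obtain ⟨ings, hl⟩ := look_eq_some_of_key rd item hk
  conv_lhs => rw [getA]
  rw [hl]
  conv_rhs => rw [getA]
  rw [hl, getA_nil]
  simp

theorem main_go (rd : List (String × List String)) (items0 : List String)
    (hA : ∀ k ∈ pvRF rd items0, k ∉ pvReach rd k) :
    ∀ (items : List String) (memo : PySem.Dict String (List (String × String))),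
      (∀ it ∈ items.takeWhile (fun it => pvIsKey rd it), it ∈ pvRF rd items0) →
      MemoOK rd memo →
      getA rd rd.length items = goB rd rd.length items memo := by
  intro items
  induction items with
  | nil => intro memo _ _; rw [getA, goB]
  | cons item rest ih =>
    intro memo hrf hm
    rw [goB]
    by_cases hk : pvIsKey rd item = true
    · rw [if_pos hk]
      have hitem : item ∈ pvRF rd items0 := by
        apply hrf
        rw [List.takeWhile_cons, hk]
        exact List.mem_cons_self
      have hrest : ∀ it ∈ rest.takeWhile (fun it => pvIsKey rd it), it ∈ pvRF rd items0 := by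
        intro it hit
        apply hrf
        rw [List.takeWhile_cons, hk]
        exact List.mem_cons_of_mem _ hit
      have hb : BndB rd (rd.length + 1) item :=
        bnd_mono rd _ item (bnd_all rd items0 hA hitem)
      obtain ⟨he1, he2⟩ :=
        expandB_correct rd items0 hA rd.length item memo hitem hk hb hm
      simp only
      rw [getA_cons_split rd rd.length item rest hk, he1, ih _ hrest he2]
    · rw [if_neg hk]
      rw [Bool.not_eq_true] at hk
      rw [getA, look_eq_none_of_not_key rd item hk]

-- ===== VERDICT (by name: the statement is the Claim_ definition above) =====
theorem get_recipe_spec : Claim_equal_get_recipe := by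
  intro items recipe_data _ hPre
  unfold Spec_get_recipe get_recipe get_recipe_alt
  exact main_go recipe_data items hPre items PySem.Dict.empty
    (start_subset_rf recipe_data items) (memoOK_empty recipe_data)
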